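-- pv_equiv track=rewrite | github.com/Eneet23/grid_network_rates | Fig7_and_8/entanglement_with_region.py | xvar_remove
-- ===== SOURCE A (Python) =====
-- def bina(digit, n):
--     """It takes the integer n and expands it into a binary number of length digit. Example bina(4,2) gives 0010"""
--     arr = []
--     for i in range(digit):
--         arr.append(n%2)
--         n = n>>1
--     bina_nums = []
--     for i in range(digit-1, -1, -1):
--         bina_nums.append(str(arr[i]))
--     bina_nums = ''.join(bina_nums)
--
--     return bina_nums
--
-- def b4r_list(n):
--     """This takes in a number n, and gives a list of binary strings of length 2^n. Example b4r_list(2)->[00,01,10,11] """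
--     b4 = [bina(n,i) for i in range(int(pow(2, n)))]
--     return [i for i in b4]
--
-- def mod_string(a):
--     """This function takes in the binary string and outputs the mode. Example : 000-> 111, 001->110"""
--     b = [str(int(i)^1) for i in a]
--     c=''.join(b)
--     return c
--
-- def str_binary(b):
--     """takes in a binary string and outputs the corresponding integer."""
--     return int(b,2)
--
-- def xvar_remove(remove_element, length_second_last_state):
--     """Given the remove_element:"r" and the length of the state"n", we will have the final state of length = n-1.
--     The X list will be of length = n-2. This gives us the pattern for contributing elements. (See overleaf for details)
--
--     """
--     length_final_state= length_second_last_state-1 #len of final state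
--     b = b4r_list(length_final_state-1) #len of X list
--     remove_element1 = length_final_state+1-remove_element
--     if remove_element == 0:
--         c1 = [[str_binary(b[i]+'0'),str_binary(mod_string(b[i])+'1')] for i in range(0,len(b))]
--         #c1 = [[b[i]+'0',mod_string(b[i])+'1'] for i in range(0,len(b))]
--     if remove_element!=0:
--         c1 = [[int(b[i][0:remove_element1-1]+'0'+b[i][remove_element1-1:],2),int(b[i][0:remove_element1-1]+'1'+b[i][remove_element1-1:],2)] for i in range(0,len(b))]
--         #c1 = [[b[i][0:remove_element1-1]+'0'+b[i][remove_element1-1:],b[i][0:remove_element1-1]+'1'+b[i][remove_element1-1:]] for i in range(0,len(b))]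
--     return c1
-- ===== SOURCE B (Python) =====
-- def xvar_remove(remove_element, length_second_last_state):
--     """Same pairs as the original, computed with integer bit arithmetic:
--     the i-th X pattern IS the integer i, and removing element r inserts a
--     bit of weight 2**(r-1) into i (r == 0 appends the parity bit at the end)."""
--     L = length_second_last_state - 2  # number of X bits
--     if L < 0:
--         return []
--     top = (1 << L) - 1
--     if remove_element == 0:
--         return [[2 * i, 2 * (top - i) + 1] for i in range(1 << L)]
--     s = remove_element - 1            # bit position of the inserted qubit, from the right
--     h = 1 << s                        # weight of the inserted bit
--     out = []
--     for i in range(1 << L):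
--         base = (i >> s) * (2 * h) + i % h
--         out.append([base, base + h])
--     return out
-- ===== Notes on version B (the rewrite author's own statement) =====
-- stated objective: simpler
-- what changed: B drops the binary-string machinery (bina/b4r_list/mod_string/int(...,2)) entirely: the i-th pattern IS the integer i, so each pair is computed by shift/div/mod arithmetic that inserts a bit of weight 2**(remove_element-1) into i (remove_element==0: parity pair [2i, 2(2**L-1-i)+1]).
-- outside the precondition, e.g. on xvar_remove(-1, 4): A returns [[0, 1], [2, 3], [4, 5], [6, 7]], B raises ValueError; on xvar_remove(4, 4): A returns [[0, 2], [1, 3], [4, 6], [5, 7]], B returns [[0, 8], [1, 9], [2, 10], [3, 11]]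
import Mathlib
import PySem

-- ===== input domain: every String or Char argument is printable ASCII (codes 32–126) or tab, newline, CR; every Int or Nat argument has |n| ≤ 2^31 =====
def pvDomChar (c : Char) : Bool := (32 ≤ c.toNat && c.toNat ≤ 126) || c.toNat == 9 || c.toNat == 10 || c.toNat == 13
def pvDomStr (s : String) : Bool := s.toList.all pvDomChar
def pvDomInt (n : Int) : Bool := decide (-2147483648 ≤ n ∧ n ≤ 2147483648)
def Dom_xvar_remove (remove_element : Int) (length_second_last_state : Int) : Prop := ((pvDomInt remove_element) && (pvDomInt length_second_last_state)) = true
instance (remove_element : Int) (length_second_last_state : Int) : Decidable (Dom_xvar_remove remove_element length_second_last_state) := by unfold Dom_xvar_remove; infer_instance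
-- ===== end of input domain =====

-- B replaces A's binary-string building, slicing and re-parsing by direct integer
-- arithmetic on the pattern index: a different, shorter algorithm with no string round-trip.

-- ===== PORT A =====
-- bina(digit, n): collect the low bits of n, then read them back most-significant first.
def pyBina (digit : Int) (n : Int) : List Char :=
  let st := (PySem.List.pyRange 0 digit 1).foldl
      (fun (st : List Int × Int) _ =>
        (st.1 ++ [PySem.Int.mod st.2 2], PySem.Int.floordiv st.2 2))
      ([], n)
  ((PySem.List.pyRange (digit - 1) (-1) (-1)).map
      (fun i => (PySem.Int.toStr (PySem.List.pyGetD st.1 i 0)).toList)).flatten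


def pyB4rList (n : Int) : List (List Char) :=
  let cnt : Int := if n < 0 then 0 else 2 ^ n.toNat
  let b4 := (PySem.List.pyRange 0 cnt 1).map (fun i => pyBina n i)
  b4.map (fun i => i)


-- mod_string: each character i becomes str(int(i) ^ 1); exact on the digit strings bina produces
def pyModString (a : List Char) : List Char :=
  (a.map (fun i => (PySem.Int.toStr (PySem.Int.bxor ((i.toNat : Int) - 48) 1)).toList)).flatten


-- str_binary(b) = int(b, 2): base-2 left fold; exact on the nonempty '0'/'1' strings it is applied to
def pyStrBinary (b : List Char) : Int :=
  b.foldl (fun acc c => 2 * acc + ((c.toNat : Int) - 48)) 0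


def xvar_remove (remove_element : Int) (length_second_last_state : Int) : List (List Int) :=
  let length_final_state := length_second_last_state - 1
  let b := pyB4rList (length_final_state - 1)
  let remove_element1 := length_final_state + 1 - remove_element
  if remove_element = 0 then
    (PySem.List.pyRange 0 (b.length : Int) 1).map (fun i =>
      [pyStrBinary (PySem.List.pyGetD b i [] ++ ['0']),
       pyStrBinary (pyModString (PySem.List.pyGetD b i []) ++ ['1'])])
  else
    (PySem.List.pyRange 0 (b.length : Int) 1).map (fun i =>
      [pyStrBinary (PySem.List.slice (PySem.List.pyGetD b i []) (some 0) (some (remove_element1 - 1)) ++ ['0'] ++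
                    PySem.List.slice (PySem.List.pyGetD b i []) (some (remove_element1 - 1)) none),
       pyStrBinary (PySem.List.slice (PySem.List.pyGetD b i []) (some 0) (some (remove_element1 - 1)) ++ ['1'] ++
                    PySem.List.slice (PySem.List.pyGetD b i []) (some (remove_element1 - 1)) none)])


-- ===== PORT B =====
def xvar_remove_alt (remove_element : Int) (length_second_last_state : Int) : List (List Int) :=
  let L := length_second_last_state - 2
  if L < 0 then []
  else
    let size : Int := 2 ^ L.toNat
    let top : Int := size - 1
    if remove_element = 0 then
      (PySem.List.pyRange 0 size 1).map (fun i => [2 * i, 2 * (top - i) + 1])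
    else
      let h : Int := 2 ^ (remove_element - 1).toNat
      (PySem.List.pyRange 0 size 1).map (fun i =>
        [PySem.Int.floordiv i h * (2 * h) + PySem.Int.mod i h,
         PySem.Int.floordiv i h * (2 * h) + PySem.Int.mod i h + h])


-- ===== PRECONDITION & SPEC =====
-- Pre_ excludes remove_element outside [0, length-1] when the state length is ≥ 2 (A still
-- returns there): for negative remove_element B's shift-based arithmetic raises ValueError
-- (negative shift count) where A returns a slice-clamped artefact; for remove_element ≥ length
-- A's insertion index is negative and Python's negative-index slicing wraps it around the
-- pattern — an accident of A's string implementation whose value B's bit arithmetic does not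
-- reproduce (B places the removed element at bit weight 2^(remove_element-1), which for large
-- remove_element it cannot even materialise).
def Pre_xvar_remove (remove_element : Int) (length_second_last_state : Int) : Prop :=
  2 ≤ length_second_last_state → (0 ≤ remove_element ∧ remove_element < length_second_last_state)
instance (remove_element : Int) (length_second_last_state : Int) : Decidable (Pre_xvar_remove remove_element length_second_last_state) := by unfold Pre_xvar_remove; infer_instance
def pvWitness_xvar_remove : Int × Int := (1, 4)

def Spec_xvar_remove (remove_element : Int) (length_second_last_state : Int) (out : List (List Int)) : Prop := out = xvar_remove_alt remove_element length_second_last_state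
instance (remove_element : Int) (length_second_last_state : Int) (out : List (List Int)) : Decidable (Spec_xvar_remove remove_element length_second_last_state out) := by unfold Spec_xvar_remove; infer_instance

-- ===== CLAIM (what is proved, stated in full; the proofs are below) =====
def Claim_equal_xvar_remove : Prop := ∀ (remove_element : Int) (length_second_last_state : Int), Dom_xvar_remove remove_element length_second_last_state → Pre_xvar_remove remove_element length_second_last_state → Spec_xvar_remove remove_element length_second_last_state (xvar_remove remove_element length_second_last_state)

-- ===== LEMMAS AND PROOFS =====

def natBits : Nat → Nat → List Char
  | 0, _ => []
  | d + 1, m => natBits d (m / 2) ++ [if m % 2 == 1 then '1' else '0']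

def lowBits : Nat → Int → List Int
  | 0, _ => []
  | d + 1, v => PySem.Int.mod v 2 :: lowBits d (PySem.Int.floordiv v 2)

theorem lowBits_length (d : Nat) (v : Int) : (lowBits d v).length = d := by
  induction d generalizing v with
  | zero => rfl
  | succ d ih => simp [lowBits, ih]

theorem foldArr (l : List Int) (acc : List Int) (v : Int) :
    (l.foldl (fun (st : List Int × Int) _ =>
      (st.1 ++ [PySem.Int.mod st.2 2], PySem.Int.floordiv st.2 2)) (acc, v)).1
    = acc ++ lowBits l.length v := by
  induction l generalizing acc v with
  | nil => simp [lowBits]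
  | cons x l ih => simp only [List.foldl_cons]; rw [ih]; simp [lowBits]

theorem rev_lowBits (d m : Nat) :
    (((lowBits d (m : Int)).reverse.map (fun v => (PySem.Int.toStr v).toList)).flatten) = natBits d m := by
  induction d generalizing m with
  | zero => rfl
  | succ d ih =>
    have h1 : PySem.Int.mod (m : Int) 2 = ((m % 2 : Nat) : Int) := PySem.Int.mod_natCast m 2
    have h2 : PySem.Int.floordiv (m : Int) 2 = ((m / 2 : Nat) : Int) := PySem.Int.floordiv_natCast m 2
    simp only [lowBits, h1, h2, List.reverse_cons, List.map_append, List.map_cons, List.map_nil,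
      List.flatten_append, ih, natBits]
    rcases Nat.mod_two_eq_zero_or_one m with h | h <;> simp [h] <;> decide

theorem pyBina_eq (d m : Nat) : pyBina (d : Int) (m : Int) = natBits d m := by
  have hlen : (PySem.List.pyRange 0 (d : Int) 1).length = d := by
    rw [PySem.List.length_pyRange_one]; simp
  have harr : ((PySem.List.pyRange 0 (d : Int) 1).foldl
      (fun (st : List Int × Int) _ =>
        (st.1 ++ [PySem.Int.mod st.2 2], PySem.Int.floordiv st.2 2)) ([], (m : Int))).1
      = lowBits d (m : Int) := by
    rw [foldArr, hlen]; rfl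
  have hrev : PySem.List.pyRange ((d : Int) - 1) (-1) (-1)
      = (PySem.List.pyRange 0 (d : Int) 1).reverse := by
    have := PySem.List.pyRange_neg_one_eq_reverse ((d : Int) - 1) (-1)
    simpa using this
  show ((PySem.List.pyRange ((d:Int) - 1) (-1) (-1)).map
      (fun i => (PySem.Int.toStr (PySem.List.pyGetD ((PySem.List.pyRange 0 (d:Int) 1).foldl
        (fun (st : List Int × Int) _ =>
          (st.1 ++ [PySem.Int.mod st.2 2], PySem.Int.floordiv st.2 2)) ([], (m:Int))).1 i 0)).toList)).flatten
      = natBits d m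
  rw [harr, hrev, List.map_reverse]
  have h0 : (PySem.List.pyRange 0 (((lowBits d (m:Int)).length : Nat) : Int) 1).map
      (fun i => PySem.List.pyGetD (lowBits d (m : Int)) i 0) = lowBits d (m : Int) :=
    PySem.List.map_pyGetD_pyRange_zero _ _
  rw [lowBits_length] at h0
  have hcomp : (fun i => (PySem.Int.toStr (PySem.List.pyGetD (lowBits d (m : Int)) i 0)).toList)
      = (fun v => (PySem.Int.toStr v).toList) ∘ (fun i => PySem.List.pyGetD (lowBits d (m : Int)) i 0) := rfl
  rw [hcomp, ← List.map_map, h0, ← List.map_reverse, rev_lowBits]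

theorem parse_foldl_acc (ys : List Char) (a : Int) :
    ys.foldl (fun acc c => 2 * acc + ((c.toNat : Int) - 48)) a
      = a * 2 ^ ys.length + pyStrBinary ys := by
  induction ys generalizing a with
  | nil => simp [pyStrBinary]
  | cons c ys ih =>
    simp only [List.foldl_cons, pyStrBinary] at *
    rw [ih, ih (2 * 0 + ((c.toNat : Int) - 48))]
    simp [List.length_cons, pow_succ]; ring

theorem parse_append (xs ys : List Char) :
    pyStrBinary (xs ++ ys) = pyStrBinary xs * 2 ^ ys.length + pyStrBinary ys := by
  simp only [pyStrBinary, List.foldl_append]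
  exact parse_foldl_acc ys _

theorem mod_pow_succ (m d : Nat) : m % 2 ^ (d + 1) = 2 * (m / 2 % 2 ^ d) + m % 2 := by
  rw [pow_succ', Nat.mod_mul]; ring

theorem parse_natBits (d m : Nat) : pyStrBinary (natBits d m) = ((m % 2 ^ d : Nat) : Int) := by
  induction d generalizing m with
  | zero => simp [natBits, pyStrBinary]
  | succ d ih =>
    rw [natBits, parse_append, ih]
    rcases Nat.mod_two_eq_zero_or_one m with h | h <;>
      simp [h, pyStrBinary, mod_pow_succ m d] <;> omega

theorem parse_natBits_lt (d m : Nat) (h : m < 2 ^ d) : pyStrBinary (natBits d m) = (m : Int) := by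
  rw [parse_natBits, Nat.mod_eq_of_lt h]

theorem modString_append (u v : List Char) :
    pyModString (u ++ v) = pyModString u ++ pyModString v := by
  simp [pyModString]

theorem modString_natBits (d m : Nat) (h : m < 2 ^ d) :
    pyModString (natBits d m) = natBits d (2 ^ d - 1 - m) := by
  induction d generalizing m with
  | zero => rfl
  | succ d ih =>
    have hp : 2 ^ (d + 1) = 2 * 2 ^ d := by rw [pow_succ']
    rw [natBits, modString_append, ih (m / 2) (by omega)]
    have h2 : (2 ^ (d + 1) - 1 - m) / 2 = 2 ^ d - 1 - m / 2 := by omega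
    have h3 : (2 ^ (d + 1) - 1 - m) % 2 = 1 - m % 2 := by omega
    rw [show natBits (d+1) (2 ^ (d+1) - 1 - m) = natBits d ((2 ^ (d+1) - 1 - m) / 2) ++
      [if (2 ^ (d+1) - 1 - m) % 2 == 1 then '1' else '0'] from rfl, h2, h3]
    rcases Nat.mod_two_eq_zero_or_one m with hm | hm <;> simp [hm, pyModString] <;> decide

theorem natBits_add (a b m : Nat) : natBits (a + b) m = natBits a (m / 2 ^ b) ++ natBits b m := by
  induction b generalizing m with
  | zero => simp [natBits]
  | succ b ih =>
    rw [show a + (b + 1) = (a + b) + 1 from rfl]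
    rw [show natBits ((a+b)+1) m = natBits (a+b) (m / 2) ++ [if m % 2 == 1 then '1' else '0'] from rfl]
    rw [ih (m / 2), Nat.div_div_eq_div_mul, ← pow_succ']
    rw [show natBits (b+1) m = natBits b (m / 2) ++ [if m % 2 == 1 then '1' else '0'] from rfl]
    simp

theorem natBits_length (d m : Nat) : (natBits d m).length = d := by
  induction d generalizing m with
  | zero => rfl
  | succ d ih => simp [natBits, ih]

theorem natBits_take (kN sN m : Nat) :
    (natBits (kN + sN) m).take kN = natBits kN (m / 2 ^ sN) := by
  rw [natBits_add, List.take_left' (natBits_length _ _)]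

theorem natBits_drop (kN sN m : Nat) :
    (natBits (kN + sN) m).drop kN = natBits sN m := by
  rw [natBits_add, List.drop_left' (natBits_length _ _)]

theorem pv_main (r n : Int) (hpre : 2 ≤ n → 0 ≤ r) (hD : ¬(2 ≤ n ∧ n ≤ r)) :
    xvar_remove r n = xvar_remove_alt r n := by
  by_cases hn : n < 2
  · -- final-state length ≤ 0: both sides are the empty list
    have hL : n - 1 - 1 < 0 := by omega
    have hL2 : n - 2 < 0 := by omega
    simp only [xvar_remove, xvar_remove_alt, pyB4rList, if_pos hL, if_pos hL2]
    have h0 : PySem.List.pyRange 0 (0:Int) 1 = [] := PySem.List.pyRange_one_eq_nil (le_refl 0)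
    simp [h0]
  · replace hn : 2 ≤ n := by omega
    have hr0 : 0 ≤ r := hpre hn
    set Ln : Nat := (n - 2).toNat with hLdef
    have hLn : n - 2 = (Ln : Int) := by omega
    have hpow : (2:Int) ^ Ln = ((2 ^ Ln : Nat) : Int) := by push_cast; ring
    have hb : pyB4rList (n - 1 - 1)
        = (PySem.List.pyRange 0 ((2 ^ Ln : Nat) : Int) 1).map (fun i => pyBina (n - 1 - 1) i) := by
      simp only [pyB4rList]
      rw [if_neg (by omega), show (n - 1 - 1) = n - 2 by ring, hLn, Int.toNat_natCast, hpow]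
      exact List.map_id' _
    have hblen : ((pyB4rList (n - 1 - 1)).length : Int) = ((2 ^ Ln : Nat) : Int) := by
      rw [hb]
      simp [PySem.List.length_pyRange_one]
    have hget : ∀ (m : Nat), m < 2 ^ Ln →
        PySem.List.pyGetD (pyB4rList (n - 1 - 1)) (m : Int) [] = natBits Ln m := by
      intro m hm
      rw [hb, PySem.List.pyGetD_map_pyRange _ _ _ _ hm]
      rw [show (n - 1 - 1) = ((Ln : Int)) by omega]
      exact pyBina_eq Ln m
    have hsz : xvar_remove_alt r n
        = (if r = 0 then
            (PySem.List.pyRange 0 ((2 ^ Ln : Nat) : Int) 1).map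
              (fun i => [2 * i, 2 * (((2 ^ Ln : Nat) : Int) - 1 - i) + 1])
          else
            (PySem.List.pyRange 0 ((2 ^ Ln : Nat) : Int) 1).map (fun i =>
              [PySem.Int.floordiv i (((2 ^ (r-1).toNat : Nat) : Int)) * (2 * (((2 ^ (r-1).toNat : Nat) : Int))) + PySem.Int.mod i (((2 ^ (r-1).toNat : Nat) : Int)),
               PySem.Int.floordiv i (((2 ^ (r-1).toNat : Nat) : Int)) * (2 * (((2 ^ (r-1).toNat : Nat) : Int))) + PySem.Int.mod i (((2 ^ (r-1).toNat : Nat) : Int)) + (((2 ^ (r-1).toNat : Nat) : Int))])) := by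
      simp only [xvar_remove_alt]
      rw [if_neg (by omega), hLn, Int.toNat_natCast, hpow]
      push_cast
      rfl
    rw [hsz]
    by_cases hr : r = 0
    · subst hr
      simp only [xvar_remove, hblen]
      rw [if_pos trivial, if_pos trivial]
      apply List.map_congr_left
      intro i hi
      rw [PySem.List.mem_pyRange_one] at hi
      obtain ⟨hi0, hilt⟩ := hi
      set m : Nat := i.toNat with hmdef
      have him : i = (m : Int) := by omega
      have hm : m < 2 ^ Ln := by omega
      rw [him, hget m hm]
      have e1 : pyStrBinary (natBits Ln m ++ ['0'])
          = 2 * (m : Int) := by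
        rw [parse_append, parse_natBits_lt Ln m hm]
        simp [pyStrBinary]; ring
      have e2 : pyStrBinary (pyModString (natBits Ln m) ++ ['1'])
          = 2 * (((2 ^ Ln : Nat) : Int) - 1 - (m : Int)) + 1 := by
        rw [modString_natBits Ln m hm, parse_append, parse_natBits_lt Ln _ (by omega)]
        have : ((2 ^ Ln - 1 - m : Nat) : Int) = ((2 ^ Ln : Nat) : Int) - 1 - (m : Int) := by omega
        simp [pyStrBinary, this]; ring
      rw [e1, e2]
    · simp only [xvar_remove, hblen]
      rw [if_neg hr, if_neg hr]
      apply List.map_congr_left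
      intro i hi
      rw [PySem.List.mem_pyRange_one] at hi
      obtain ⟨hi0, hilt⟩ := hi
      set m : Nat := i.toNat with hmdef
      have him : i = (m : Int) := by omega
      have hm : m < 2 ^ Ln := by omega
      have hr1 : 1 ≤ r := by omega
      have hrn : r < n := by omega
      set kN : Nat := (n - r - 1).toNat with hkdef
      set sN : Nat := (r - 1).toNat with hsdef
      have hKS : kN + sN = Ln := by omega
      have hkI : n - 1 + 1 - r - 1 = (kN : Int) := by omega
      rw [him, hget m hm, hkI]
      -- slices are take/drop of the pattern
      have hu : PySem.List.slice (natBits Ln m) (some 0) (some (kN : Int))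
          = natBits kN (m / 2 ^ sN) := by
        rw [PySem.List.slice_toNat _ (by omega) (by omega)]
        simp only [Int.toNat_natCast, Int.toNat_zero, Nat.sub_zero, List.drop_zero]
        rw [← hKS, natBits_take]
      have hv : PySem.List.slice (natBits Ln m) (some (kN : Int)) none
          = natBits sN m := by
        rw [PySem.List.slice_from _ (by omega), Int.toNat_natCast, ← hKS, natBits_drop]
      have hmul : 2 ^ kN * 2 ^ sN = 2 ^ Ln := by rw [← pow_add, hKS]
      have hhi : m / 2 ^ sN < 2 ^ kN := (Nat.div_lt_iff_lt_mul (by positivity)).mpr (hmul ▸ hm)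
      have hfd : PySem.Int.floordiv (m : Int) ((2 ^ sN : Nat) : Int)
          = ((m / 2 ^ sN : Nat) : Int) := PySem.Int.floordiv_natCast m (2 ^ sN)
      have hmd : PySem.Int.mod (m : Int) ((2 ^ sN : Nat) : Int)
          = ((m % 2 ^ sN : Nat) : Int) := PySem.Int.mod_natCast m (2 ^ sN)
      have e0 : pyStrBinary (natBits sN m) = ((m % 2 ^ sN : Nat) : Int) := parse_natBits sN m
      have e1 : pyStrBinary (natBits kN (m / 2 ^ sN) ++ ['0'] ++ natBits sN m)
          = ((m / 2 ^ sN : Nat) : Int) * (2 * ((2 ^ sN : Nat) : Int)) + ((m % 2 ^ sN : Nat) : Int) := by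
        rw [parse_append, parse_append, parse_natBits_lt kN _ hhi, e0]
        simp [pyStrBinary, natBits_length]
        ring
      have e2 : pyStrBinary (natBits kN (m / 2 ^ sN) ++ ['1'] ++ natBits sN m)
          = ((m / 2 ^ sN : Nat) : Int) * (2 * ((2 ^ sN : Nat) : Int)) + ((m % 2 ^ sN : Nat) : Int)
            + ((2 ^ sN : Nat) : Int) := by
        rw [parse_append, parse_append, parse_natBits_lt kN _ hhi, e0]
        simp [pyStrBinary, natBits_length]
        ring
      rw [hu, hv, hfd, hmd, e1, e2]

-- ===== VERDICT (by name: the statement is the Claim_ definition above) =====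
theorem xvar_remove_spec : Claim_equal_xvar_remove := by
  intro r n _ hpre
  unfold Spec_xvar_remove
  refine pv_main r n (fun h => (hpre h).1) ?_
  rintro ⟨h2, hnr⟩
  have := (hpre h2).2
  omega
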